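-- pv_equiv track=rewrite | github.com/AdMoR/pathformer | pathformer/datasets/path_dataset.py | find_file_i_for_sample_index
-- ===== SOURCE A (Python) =====
-- from typing import List, Dict
--
-- def find_file_i_for_sample_index(cumsum_index: List[int], dataset_index: int):
--     """
--     How does it work :
--     we want sample index from the dataset, the cumsum tells us in which file it is located
--     ex:
--     index = 733
--     cumsum_inex = [133, 546, 833]
--
--     thus the right file_index is 2
--     """
--     i = 0
--     while dataset_index >= cumsum_index[i] and i < len(cumsum_index) - 1:
--         i += 1
--     if i == 0:
--         reminder = dataset_index
--     else:
--         reminder = dataset_index - (cumsum_index[i - 1])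
--     return i, reminder
-- ===== SOURCE B (Python) =====
-- def find_file_i_for_sample_index(cumsum_index, dataset_index):
--     # Backward scan without early exit: walk the candidate file indices from the
--     # back, keeping the lowest index whose cumsum bound exceeds dataset_index;
--     # default is the last file index.
--     i = len(cumsum_index) - 1
--     for j in range(len(cumsum_index) - 2, -1, -1):
--         if dataset_index < cumsum_index[j]:
--             i = j
--     if i == 0:
--         reminder = dataset_index
--     else:
--         reminder = dataset_index - cumsum_index[i - 1]
--     return i, reminder
-- ===== Notes on version B (the rewrite author's own statement) =====
-- stated objective: alternative
-- what changed: Replaces A's forward while-loop with compound continue-condition and early exit by a backward for-loop over the candidate indices that keeps the lowest index whose cumsum entry exceeds dataset_index (default: last index), then computes the remainder from it.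
import Mathlib
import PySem

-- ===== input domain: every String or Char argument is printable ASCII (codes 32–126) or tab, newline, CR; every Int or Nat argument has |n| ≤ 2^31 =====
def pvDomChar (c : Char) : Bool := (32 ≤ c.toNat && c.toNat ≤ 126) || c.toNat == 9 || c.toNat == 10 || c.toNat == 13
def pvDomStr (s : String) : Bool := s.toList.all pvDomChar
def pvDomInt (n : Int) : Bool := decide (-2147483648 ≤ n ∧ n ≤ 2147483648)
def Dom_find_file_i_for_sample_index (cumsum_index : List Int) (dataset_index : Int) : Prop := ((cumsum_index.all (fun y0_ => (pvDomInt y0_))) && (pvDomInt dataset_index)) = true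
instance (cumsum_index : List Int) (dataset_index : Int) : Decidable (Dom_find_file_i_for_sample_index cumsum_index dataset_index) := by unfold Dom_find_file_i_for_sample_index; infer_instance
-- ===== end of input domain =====

-- B replaces A's forward early-exit while-loop by a backward scan keeping the lowest hit index (alternative decomposition, same cost).

-- ===== PORT A =====
-- the `while dataset_index >= cumsum_index[i] and i < len(cumsum_index)-1: i += 1` loop;
-- pyGet? = Python indexing (none = IndexError, only reachable on the empty list, excluded by Pre_)
def pvA_loop (cumsum_index : List Int) (dataset_index : Int) (i : Nat) : Nat :=
  match PySem.List.pyGet? cumsum_index (Int.ofNat i) with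
  | none => i
  | some c =>
    if h : dataset_index ≥ c ∧ i < cumsum_index.length - 1 then
      pvA_loop cumsum_index dataset_index (i + 1)
    else i
termination_by cumsum_index.length - i
decreasing_by omega

def find_file_i_for_sample_index (cumsum_index : List Int) (dataset_index : Int) : Int × Int :=
  let i := pvA_loop cumsum_index dataset_index 0
  if i = 0 then
    ((Int.ofNat i, dataset_index) : Int × Int)
  else
    (Int.ofNat i, dataset_index - ((PySem.List.pyGet? cumsum_index (Int.ofNat i - 1)).getD 0))

-- ===== PORT B =====
-- `for j in range(len(cumsum_index)-2, -1, -1): if dataset_index < cumsum_index[j]: i = j`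
-- as a fold over the countdown range; every j in the range is a valid index, so getD 0 never fires
def find_file_i_for_sample_index_alt (cumsum_index : List Int) (dataset_index : Int) : Int × Int :=
  let i : Int := (PySem.List.pyRange ((cumsum_index.length : Int) - 2) (-1) (-1)).foldl
      (fun i j => if dataset_index < (PySem.List.pyGet? cumsum_index j).getD 0 then j else i)
      ((cumsum_index.length : Int) - 1)
  if i = 0 then
    ((i, dataset_index) : Int × Int)
  else
    (i, dataset_index - ((PySem.List.pyGet? cumsum_index (i - 1)).getD 0))

-- ===== PRECONDITION & SPEC =====
-- Pre_ excludes only the empty list, on which both A and B raise IndexError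
def Pre_find_file_i_for_sample_index (cumsum_index : List Int) (dataset_index : Int) : Prop :=
  cumsum_index ≠ []
instance (cumsum_index : List Int) (dataset_index : Int) : Decidable (Pre_find_file_i_for_sample_index cumsum_index dataset_index) := by unfold Pre_find_file_i_for_sample_index; infer_instance

def pvWitness_find_file_i_for_sample_index : List Int × Int := ([133, 546, 833], 733)

def Spec_find_file_i_for_sample_index (cumsum_index : List Int) (dataset_index : Int) (out : Int × Int) : Prop := out = find_file_i_for_sample_index_alt cumsum_index dataset_index
instance (cumsum_index : List Int) (dataset_index : Int) (out : Int × Int) : Decidable (Spec_find_file_i_for_sample_index cumsum_index dataset_index out) := by unfold Spec_find_file_i_for_sample_index; infer_instance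

-- ===== CLAIM (what is proved, stated in full; the proofs are below) =====
def Claim_equal_find_file_i_for_sample_index : Prop := ∀ (cumsum_index : List Int) (dataset_index : Int), Dom_find_file_i_for_sample_index cumsum_index dataset_index → Pre_find_file_i_for_sample_index cumsum_index dataset_index → Spec_find_file_i_for_sample_index cumsum_index dataset_index (find_file_i_for_sample_index cumsum_index dataset_index)

-- ===== LEMMAS AND PROOFS =====

lemma pvPyGet_eq (a : List Int) (k : Nat) (hk : k < a.length) :
    PySem.List.pyGet? a (Int.ofNat k) = some (a.getD k 0) := by
  simp [PySem.List.pyGet?, PySem.List.pyIdx?, hk, List.getD_eq_getElem?_getD]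

lemma pvGetD_eq (a : List Int) (k : Nat) (hk : k < a.length) : a.getD k 0 = a[k] := by
  simp [List.getD_eq_getElem?_getD, List.getElem?_eq_getElem hk]

-- A's loop stopped exactly at t whenever all entries below t admit dataset_index
-- and t is a stopping point (last index, or a strict majorant).
lemma pvA_loop_eq (a : List Int) (x : Int) (t : Nat) (ht : t < a.length)
    (hbelow : ∀ k, k < t → a.getD k 0 ≤ x)
    (hstop : t = a.length - 1 ∨ x < a.getD t 0) :
    ∀ i, i ≤ t → pvA_loop a x i = t := by
  intro i hi
  induction hn : t - i generalizing i with
  | zero =>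
    have hit : i = t := by omega
    subst hit
    rw [pvA_loop, pvPyGet_eq a i ht]
    have : ¬ (x ≥ a.getD i 0 ∧ i < a.length - 1) := by
      rcases hstop with h | h
      · omega
      · intro ⟨h1, _⟩; omega
    exact dif_neg this
  | succ m ih =>
    have hlt : i < t := by omega
    rw [pvA_loop, pvPyGet_eq a i (by omega)]
    have hcond : x ≥ a.getD i 0 ∧ i < a.length - 1 := ⟨hbelow i hlt, by omega⟩
    simp only [hcond, and_self, dite_true]
    exact ih (i + 1) (by omega) (by omega)

-- B's backward fold over range(m-1, -1, -1) computes the first index below m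
-- whose entry strictly exceeds x (findIdx), defaulting to the initial accumulator.
lemma pvFoldB_eq (a : List Int) (x : Int) :
    ∀ (m : Nat) (z : Int), m ≤ a.length →
    (PySem.List.pyRange (Int.ofNat m - 1) (-1) (-1)).foldl
      (fun i j => if x < (PySem.List.pyGet? a j).getD 0 then j else i) z
    = if a.findIdx (fun c => x < c) < m then Int.ofNat (a.findIdx (fun c => x < c)) else z := by
  intro m
  induction m with
  | zero =>
    intro z _
    rw [show (Int.ofNat 0 - 1 : Int) = -1 by decide,
      PySem.List.pyRange_neg_one_eq_nil (le_refl (-1))]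
    simp
  | succ m ih =>
    intro z hm
    have hml : m < a.length := by omega
    rw [show (Int.ofNat (m + 1) - 1 : Int) = Int.ofNat m by
        simp only [Int.ofNat_eq_natCast]; omega,
      PySem.List.pyRange_neg_one_cons (show (-1 : Int) < Int.ofNat m by
        simp only [Int.ofNat_eq_natCast]; omega)]
    rw [List.foldl_cons, ih _ (by omega)]
    rw [pvPyGet_eq a m hml]
    rcases Nat.lt_trichotomy (a.findIdx (fun c => x < c)) m with hf | hf | hf
    · rw [if_pos hf, if_pos (show a.findIdx (fun c => x < c) < m + 1 by omega)]
    · subst hf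
      have hp : x < a.getD (a.findIdx (fun c => x < c)) 0 := by
        rw [pvGetD_eq a _ (by omega)]
        simpa using @List.findIdx_getElem _ (fun c => x < c) a (by omega)
      rw [List.getD_eq_getElem?_getD] at hp
      simp [hp]
    · have hp : ¬ x < a.getD m 0 := by
        rw [pvGetD_eq a m hml]
        simpa using List.not_of_lt_findIdx (p := fun c => x < c) (xs := a) (i := m) hf
      rw [List.getD_eq_getElem?_getD] at hp
      simp [hp, show ¬ a.findIdx (fun c => x < c) < m by omega,
        show ¬ a.findIdx (fun c => x < c) < m + 1 by omega]

-- ===== VERDICT (by name: the statement is the Claim_ definition above) =====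
theorem find_file_i_for_sample_index_spec : Claim_equal_find_file_i_for_sample_index := by
  intro a x _ hne
  have hn : 0 < a.length := List.length_pos_iff.mpr hne
  set f := a.findIdx (fun c => x < c) with hfdef
  have hfle : f ≤ a.length := List.findIdx_le_length
  set t := min f (a.length - 1) with htdef
  have ht : t < a.length := by omega
  have hA : pvA_loop a x 0 = t := by
    apply pvA_loop_eq a x t ht
    · intro k hk
      have hkf : k < f := by omega
      have := List.not_of_lt_findIdx (p := fun c => x < c) (xs := a) (i := k) hkf
      rw [pvGetD_eq a k (by omega)]
      simpa using this
    · by_cases hcase : f < a.length - 1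
      · right
        have htf : t = f := by omega
        rw [htf, pvGetD_eq a f (by omega)]
        have := @List.findIdx_getElem _ (fun c => x < c) a (by omega)
        simpa using this
      · left; omega
    · omega
  have hB : (PySem.List.pyRange ((a.length : Int) - 2) (-1) (-1)).foldl
      (fun i j => if x < (PySem.List.pyGet? a j).getD 0 then j else i)
      ((a.length : Int) - 1) = Int.ofNat t := by
    rw [show ((a.length : Int) - 2) = Int.ofNat (a.length - 1) - 1 by
      simp only [Int.ofNat_eq_natCast]; omega]
    rw [pvFoldB_eq a x (a.length - 1) _ (by omega)]
    rw [← hfdef]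
    by_cases hf : f < a.length - 1
    · rw [if_pos hf]; simp only [Int.ofNat_eq_natCast]; omega
    · rw [if_neg hf]; simp only [Int.ofNat_eq_natCast]; omega
  unfold Spec_find_file_i_for_sample_index find_file_i_for_sample_index
    find_file_i_for_sample_index_alt
  simp only [hA, hB]
  by_cases h0 : t = 0
  · simp [h0]
  · simp [h0]
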